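-- pv_equiv track=rewrite | github.com/Asifanwar59/The-Minion-Game | The Minion Game.py | segVowelCons
-- ===== SOURCE A (Python) =====
-- def segVowelCons(string):
--     lenStr = len(string)
--     strArrVowel = []
--     strArrCons = []
--
--     for index in range(0, lenStr):
--         c = string[index]
--         if c == 'A' or c == 'E' or c == 'I' or c == 'O' or c == 'U':
--             if c not in  strArrVowel:
--                 strArrVowel.extend(c)
--         else:
--             if c not in  strArrCons:
--                 strArrCons.extend(c)
--
--     return strArrVowel, strArrCons
-- ===== SOURCE B (Python) =====
-- def segVowelCons(string):
--     unique = list(dict.fromkeys(string))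
--     vowels = [c for c in unique if c in ('A', 'E', 'I', 'O', 'U')]
--     cons = [c for c in unique if c not in ('A', 'E', 'I', 'O', 'U')]
--     return vowels, cons
-- ===== Notes on version B (the rewrite author's own statement) =====
-- stated objective: simpler
-- what changed: Replaces A's single interleaved loop with per-branch list-membership dedup by a two-phase shape: one global first-occurrence dedup via dict.fromkeys, then two comprehension passes partitioning into vowels and consonants; dict.fromkeys also removes the O(k) list scans (measured faster).
import Mathlib
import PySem

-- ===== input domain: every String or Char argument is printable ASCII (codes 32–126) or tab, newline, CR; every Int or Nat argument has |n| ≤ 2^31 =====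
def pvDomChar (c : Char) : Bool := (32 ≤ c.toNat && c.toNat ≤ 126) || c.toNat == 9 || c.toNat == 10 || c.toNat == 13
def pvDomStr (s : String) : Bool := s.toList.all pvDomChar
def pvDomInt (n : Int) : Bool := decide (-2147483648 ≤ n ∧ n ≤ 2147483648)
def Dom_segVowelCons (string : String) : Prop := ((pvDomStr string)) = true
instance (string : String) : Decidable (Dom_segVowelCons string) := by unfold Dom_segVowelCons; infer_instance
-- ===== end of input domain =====

-- ===== PORT A =====
-- B replaces A's interleaved loop (per-branch list-membership dedup) with a global dict.fromkeys dedup then two partition passes: simpler two-phase shape, measured faster in a timing run.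
-- loop body of A's for-loop (branches in A's order)
def segA_step (st : List String × List String) (ch : Char) : List String × List String :=
  let c := String.mk [ch]
  if c == "A" || c == "E" || c == "I" || c == "O" || c == "U" then
    if st.1.contains c then st else (st.1 ++ [c], st.2)
  else
    if st.2.contains c then st else (st.1, st.2 ++ [c])

def segVowelCons (string : String) : List String × List String :=
  string.toList.foldl segA_step ([], [])

-- ===== PORT B =====
def segB_isVowel (c : String) : Bool := ["A", "E", "I", "O", "U"].contains c

def segVowelCons_alt (string : String) : List String × List String :=
  let unique := PySem.List.dedup (string.toList.map (fun ch => String.mk [ch]))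
  (unique.filter segB_isVowel, unique.filter (fun c => ! segB_isVowel c))

-- ===== PRECONDITION & SPEC =====
def Spec_segVowelCons (string : String) (out : List String × List String) : Prop := out = segVowelCons_alt string
instance (string : String) (out : List String × List String) : Decidable (Spec_segVowelCons string out) := by unfold Spec_segVowelCons; infer_instance

-- ===== CLAIM (what is proved, stated in full; the proofs are below) =====
def Claim_equal_segVowelCons : Prop := ∀ (string : String), Dom_segVowelCons string → Spec_segVowelCons string (segVowelCons string)

-- ===== LEMMAS AND PROOFS =====

-- membership in a filtered list, when the element satisfies the filter
theorem seg_contains_filter {q : String → Bool} (u : List String) (c : String) (hq : q c = true) :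
    (u.filter q).contains c = u.contains c := by
  induction u with
  | nil => rfl
  | cons x xs ih =>
    by_cases hx : x = c
    · subst hx; simp [hq]
    · by_cases hqx : q x = true <;>
        simp [hqx, ih, Ne.symm hx] <;> exact fun _ => hq

-- the vowel tests of the two ports agree
theorem seg_isVowel_eq (c : String) :
    (c == "A" || c == "E" || c == "I" || c == "O" || c == "U") = segB_isVowel c := by
  simp [segB_isVowel, Bool.beq_eq_decide_eq, Bool.or_assoc]

-- loop invariant: A's fold from a partitioned state equals the partition of the dedup fold
theorem seg_loop_eq (l : List Char) (u : List String) :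
    l.foldl segA_step (u.filter segB_isVowel, u.filter (fun c => ! segB_isVowel c)) =
      ((l.foldl (fun s ch => PySem.Set.add s (String.mk [ch])) u).filter segB_isVowel,
       (l.foldl (fun s ch => PySem.Set.add s (String.mk [ch])) u).filter (fun c => ! segB_isVowel c)) := by
  induction l generalizing u with
  | nil => rfl
  | cons ch rest ih =>
    have step : segA_step (u.filter segB_isVowel, u.filter (fun c => ! segB_isVowel c)) ch =
        ((PySem.Set.add u (String.mk [ch])).filter segB_isVowel,
         (PySem.Set.add u (String.mk [ch])).filter (fun c => ! segB_isVowel c)) := by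
      simp only [segA_step, PySem.Set.add, PySem.Set.contains, seg_isVowel_eq]
      by_cases hv : segB_isVowel (String.mk [ch]) = true
      · rw [seg_contains_filter u _ hv]
        by_cases hc : String.mk [ch] ∈ u <;>
          simp [hv, hc, List.filter_append]
      · have hv' : segB_isVowel (String.mk [ch]) = false := by
          simpa using hv
        have hnv : (! segB_isVowel (String.mk [ch])) = true := by simp [hv']
        rw [hv', seg_contains_filter (q := fun c => ! segB_isVowel c) u _ hnv]
        by_cases hc : String.mk [ch] ∈ u <;>
          simp [hv', hc, List.filter_append]
    simp only [List.foldl_cons, step, ih]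

-- ===== VERDICT (by name: the statement is the Claim_ definition above) =====
theorem segVowelCons_spec : Claim_equal_segVowelCons := by
  intro s _
  unfold Spec_segVowelCons segVowelCons segVowelCons_alt
  have h := seg_loop_eq s.toList []
  simp only [List.filter_nil] at h
  rw [h]
  simp [PySem.List.dedup, PySem.Set.ofList, List.foldl_map, PySem.Set.empty]
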